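-- pv_equiv track=rewrite | github.com/weakincentives/weakincentives | src/weakincentives/verify/checkers/documentation.py | _preprocess_code
-- ===== SOURCE A (Python) =====
-- def _preprocess_code(code: str) -> str:
--     """Preprocess code for type checking."""
--     lines = code.split("\n")
--     processed: list[str] = []
--
--     for line in lines:
--         stripped = line.strip()
--         if stripped == "...":
--             indent = len(line) - len(line.lstrip())
--             processed.append(" " * indent + "pass")
--         else:
--             processed.append(line)
--
--     return "\n".join(processed)
-- ===== SOURCE B (Python) =====
-- def _preprocess_code(code: str) -> str:
--     """Single left-to-right scan over the string; no split/strip/join of line objects."""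
--     n = len(code)
--     pieces = []
--     i = 0
--     while True:
--         start = i
--         while i < n and code[i] != "\n":
--             i += 1
--         j = start
--         while j < i and code[j].isspace():
--             j += 1
--         if code[j:j + 3] == "..." and all(code[t].isspace() for t in range(j + 3, i)):
--             pieces.append(" " * (j - start) + "pass")
--         else:
--             pieces.append(code[start:i])
--         if i == n:
--             break
--         pieces.append("\n")
--         i += 1
--     return "".join(pieces)
-- ===== Notes on version B (the rewrite author's own statement) =====
-- stated objective: alternative
-- what changed: B replaces A's split-into-lines / strip-each-line / join pipeline by a single index-based scan over the string that recognizes ellipsis-only line segments in place and emits the output pieces as it goes.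
import Mathlib
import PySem

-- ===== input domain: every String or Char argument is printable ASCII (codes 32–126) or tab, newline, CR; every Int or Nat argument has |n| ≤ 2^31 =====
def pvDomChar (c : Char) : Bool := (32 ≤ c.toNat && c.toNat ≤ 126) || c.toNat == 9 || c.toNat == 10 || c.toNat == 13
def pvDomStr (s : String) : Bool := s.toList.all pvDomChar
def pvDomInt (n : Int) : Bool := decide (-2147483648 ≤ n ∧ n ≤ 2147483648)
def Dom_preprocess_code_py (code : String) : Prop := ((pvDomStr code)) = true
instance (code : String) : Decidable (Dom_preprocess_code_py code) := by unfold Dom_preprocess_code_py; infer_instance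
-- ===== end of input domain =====

-- B replaces A's split-lines/strip/join pipeline by a single left-to-right scan over the characters (alternative decomposition).

-- ===== PORT A =====
-- per-line body of A's for-loop: replace a line whose strip() is "..." by spaces + "pass"
def pvLineA (line : List Char) : List Char :=
  let stripped := PySem.Chars.strip line
  if stripped = ['.', '.', '.'] then
    let indent := line.length - (PySem.Chars.lstrip line).length
    List.replicate indent ' ' ++ ['p', 'a', 's', 's']
  else line

def preprocess_code_py (code : String) : String :=
  let lines := PySem.Chars.splitOn code.toList ['\n']
  let processed := lines.foldl (fun acc line => acc ++ [pvLineA line]) []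
  String.mk (PySem.Chars.join ['\n'] processed)

-- ===== PORT B =====
-- Source B's inner while-loop over j (leading whitespace) is the dropWhile below; the
-- slice/all-range check on the trailing part is the take/drop/all on the line segment.
def pvLineB (line : List Char) : List Char :=
  let rest := line.dropWhile PySem.Chars.isspace           -- while j < i and code[j].isspace(): j += 1
  if rest.take 3 = ['.', '.', '.'] ∧ (rest.drop 3).all PySem.Chars.isspace then
    List.replicate (line.length - rest.length) ' ' ++ ['p', 'a', 's', 's']
  else line

-- the outer while-True loop of Source B: scan to the next '\n' (the takeWhile/dropWhile pair
-- is Source B's 'while i < n and code[i] != "\n"' index scan), process the segment, continue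
def pvScanB (cs : List Char) : List Char :=
  let line := cs.takeWhile (· ≠ '\n')
  match h : cs.dropWhile (· ≠ '\n') with
  | [] => pvLineB line                                     -- i == n: break
  | _ :: r => pvLineB line ++ '\n' :: pvScanB r
termination_by cs.length
decreasing_by
  have h1 : (cs.dropWhile (· ≠ '\n')).length ≤ cs.length := (List.dropWhile_sublist _).length_le
  rw [h] at h1
  simp at h1
  omega

def preprocess_code_py_alt (code : String) : String :=
  String.mk (pvScanB code.toList)

-- ===== PRECONDITION & SPEC =====
def Spec_preprocess_code_py (code : String) (out : String) : Prop := out = preprocess_code_py_alt code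
instance (code : String) (out : String) : Decidable (Spec_preprocess_code_py code out) := by unfold Spec_preprocess_code_py; infer_instance

-- ===== CLAIM (what is proved, stated in full; the proofs are below) =====
def Claim_equal_preprocess_code_py : Prop := ∀ (code : String), Dom_preprocess_code_py code → Spec_preprocess_code_py code (preprocess_code_py code)

-- ===== LEMMAS AND PROOFS =====

-- proof-side reformulation of splitOn on the single-character separator '\n'
def pvSplit (cs : List Char) : List (List Char) :=
  let line := cs.takeWhile (· ≠ '\n')
  match h : cs.dropWhile (· ≠ '\n') with
  | [] => [line]
  | _ :: r => line :: pvSplit r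
termination_by cs.length
decreasing_by
  have h1 : (cs.dropWhile (· ≠ '\n')).length ≤ cs.length := (List.dropWhile_sublist _).length_le
  rw [h] at h1
  simp at h1
  omega

theorem pvSplit_ne_nil (cs : List Char) : pvSplit cs ≠ [] := by
  rw [pvSplit]
  split <;> simp

theorem pvSplit_nil : pvSplit [] = [[]] := by
  rw [pvSplit]
  rfl

theorem pvSplit_newline_cons (cs : List Char) : pvSplit ('\n' :: cs) = [] :: pvSplit cs := by
  rw [pvSplit]
  split <;> rename_i heq <;> rw [List.dropWhile_cons_of_neg (by decide)] at heq <;> cases heq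
  simp

theorem pvSplit_cons_of_ne (c : Char) (cs : List Char) (hc : c ≠ '\n') :
    pvSplit (c :: cs) = (pvSplit cs).modifyHead (c :: ·) := by
  rw [pvSplit, pvSplit]
  split <;> rename_i heq <;> rw [List.dropWhile_cons_of_pos (by simp [hc])] at heq <;>
    split <;> rename_i heq2 <;> rw [heq2] at heq <;> cases heq <;> simp [hc]

theorem pvGo_eq (fuel : Nat) : ∀ (l cur : List Char) (accL : List (List Char)),
    l.length < fuel →
    PySem.Chars.splitOn.go ['\n'] fuel l cur accL =
      accL.reverse ++ (pvSplit l).modifyHead (cur.reverse ++ ·) := by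
  induction fuel with
  | zero => intro l cur accL h; omega
  | succ f ih =>
    intro l cur accL h
    match l with
    | [] =>
      simp [PySem.Chars.splitOn.go, pvSplit_nil]
    | c :: rest =>
      by_cases hc : c = '\n'
      · subst hc
        rw [PySem.Chars.splitOn.go]
        simp only [List.isPrefixOf, beq_self_eq_true, Bool.true_and,
          if_true, List.length_cons, List.length_nil, List.drop_succ_cons, List.drop_zero]
        rw [ih rest [] (cur.reverse :: accL) (by simpa using Nat.lt_of_succ_lt_succ h)]
        rw [pvSplit_newline_cons]
        rcases hsp : pvSplit rest with _ | ⟨a, t⟩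
        · exact absurd hsp (pvSplit_ne_nil rest)
        · simp
      · rw [PySem.Chars.splitOn.go]
        have hpre : ['\n'].isPrefixOf (c :: rest) = false := by
          simp [List.isPrefixOf, Ne.symm hc]
        simp only [hpre, Bool.false_eq_true, if_false]
        rw [ih rest (c :: cur) accL (by simpa using Nat.lt_of_succ_lt_succ h)]
        rw [pvSplit_cons_of_ne c rest hc]
        rcases hsp : pvSplit rest with _ | ⟨a, t⟩
        · exact absurd hsp (pvSplit_ne_nil rest)
        · simp

theorem pvSplitOn_eq (cs : List Char) :
    PySem.Chars.splitOn cs ['\n'] = pvSplit cs := by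
  rw [PySem.Chars.splitOn]
  rw [pvGo_eq (cs.length + 1) cs [] [] (by omega)]
  rcases hsp : pvSplit cs with _ | ⟨a, t⟩
  · exact absurd hsp (pvSplit_ne_nil cs)
  · simp

theorem pvRstrip_eq_dots_iff (r : List Char) :
    PySem.Chars.rstrip r = ['.', '.', '.'] ↔
      r.take 3 = ['.', '.', '.'] ∧ (r.drop 3).all PySem.Chars.isspace = true := by
  constructor
  · intro h
    have h' : List.dropWhile PySem.Chars.isspace r.reverse = ['.', '.', '.'] := by
      have := congrArg List.reverse h
      simpa [PySem.Chars.rstrip] using this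
    have hr : r.reverse = r.reverse.takeWhile PySem.Chars.isspace ++ ['.', '.', '.'] := by
      conv_lhs => rw [← List.takeWhile_append_dropWhile (p := PySem.Chars.isspace) (l := r.reverse)]
      rw [h']
    have hr2 : r = ['.', '.', '.'] ++ (r.reverse.takeWhile PySem.Chars.isspace).reverse := by
      have := congrArg List.reverse hr
      simpa using this
    constructor
    · rw [hr2, show (3 : Nat) = (['.', '.', '.'] : List Char).length from rfl, List.take_left]
    · rw [hr2, show (3 : Nat) = (['.', '.', '.'] : List Char).length from rfl, List.drop_left]
      rw [List.all_eq_true]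
      intro x hx
      rw [List.mem_reverse] at hx
      exact List.mem_takeWhile_imp hx
  · rintro ⟨h1, h2⟩
    have hr : r = ['.', '.', '.'] ++ r.drop 3 := by
      have := List.take_append_drop 3 r
      rw [h1] at this
      exact this.symm
    rw [hr]
    unfold PySem.Chars.rstrip
    rw [List.reverse_append, List.dropWhile_append]
    have hws : List.dropWhile PySem.Chars.isspace (r.drop 3).reverse = [] := by
      rw [List.dropWhile_eq_nil_iff]
      intro x hx
      rw [List.mem_reverse] at hx
      exact List.all_eq_true.mp h2 x hx
    simp [hws, PySem.Chars.isspace]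

theorem pvLine_eq (l : List Char) : pvLineA l = pvLineB l := by
  unfold pvLineA pvLineB PySem.Chars.strip PySem.Chars.lstrip
  by_cases hcond : (l.dropWhile PySem.Chars.isspace).take 3 = ['.', '.', '.'] ∧
      ((l.dropWhile PySem.Chars.isspace).drop 3).all PySem.Chars.isspace = true
  · rw [if_pos ((pvRstrip_eq_dots_iff _).mpr hcond), if_pos hcond]
  · rw [if_neg (fun h => hcond ((pvRstrip_eq_dots_iff _).mp h)), if_neg hcond]

theorem pvScan_eq (cs : List Char) :
    pvScanB cs = PySem.Chars.join ['\n'] ((pvSplit cs).map pvLineA) := by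
  rw [pvScanB, pvSplit]
  split
  · simp [PySem.Chars.join_singleton, pvLine_eq]
  · rename_i x r heq
    rw [pvScan_eq r]
    rcases hsp : pvSplit r with _ | ⟨a, t⟩
    · exact absurd hsp (pvSplit_ne_nil r)
    · simp [PySem.Chars.join_cons_cons, pvLine_eq]
termination_by cs.length
decreasing_by
  have h1 : (cs.dropWhile (· ≠ '\n')).length ≤ cs.length := (List.dropWhile_sublist _).length_le
  simp_all

-- ===== VERDICT (by name: the statement is the Claim_ definition above) =====
theorem preprocess_code_py_spec : Claim_equal_preprocess_code_py := by
  intro code _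
  simp only [Spec_preprocess_code_py, preprocess_code_py, preprocess_code_py_alt]
  rw [PySem.List.foldl_append_singleton_eq_map, pvScan_eq, pvSplitOn_eq]
  simp
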